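-- pv_equiv track=rewrite | github.com/redis/redis-benchmarks-specification | redis_benchmarks_specification/commands/commands.py | generate_command_groups
-- ===== SOURCE A (Python) =====
-- def generate_command_groups(commands_json):
--     groups = {}
--     for command_name, command_description in commands_json.items():
--         group_name = command_description["group"]
--         if group_name not in groups:
--             groups[group_name] = []
--         groups[group_name].append(command_name)
--     return groups
-- ===== SOURCE B (Python) =====
-- def generate_command_groups(commands_json):
--     order = dict.fromkeys(desc["group"] for desc in commands_json.values())
--     return {
--         g: [name for name, desc in commands_json.items() if desc["group"] == g]
--         for g in order
--     }
-- ===== Notes on version B (the rewrite author's own statement) =====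
-- stated objective: alternative
-- what changed: Replaces the single-pass mutable-dict accumulation with a two-phase declarative build: first dedup the group names in first-occurrence order, then a dict comprehension that filters the command names per group.
import Mathlib
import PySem

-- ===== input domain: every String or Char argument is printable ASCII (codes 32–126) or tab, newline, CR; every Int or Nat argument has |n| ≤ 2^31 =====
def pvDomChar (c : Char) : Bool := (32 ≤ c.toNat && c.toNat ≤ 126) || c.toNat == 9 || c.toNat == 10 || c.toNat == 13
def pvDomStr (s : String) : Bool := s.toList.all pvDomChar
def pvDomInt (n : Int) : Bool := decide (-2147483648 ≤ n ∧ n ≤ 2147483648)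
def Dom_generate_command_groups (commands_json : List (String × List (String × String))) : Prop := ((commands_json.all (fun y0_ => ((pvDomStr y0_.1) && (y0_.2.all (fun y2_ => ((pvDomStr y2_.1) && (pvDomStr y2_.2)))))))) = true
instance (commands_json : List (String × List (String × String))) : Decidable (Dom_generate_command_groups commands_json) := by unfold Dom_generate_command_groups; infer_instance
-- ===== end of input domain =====

-- B replaces A's single-pass mutable-dict grouping by a declarative two-phase build
-- (dedup the group names, then filter the names per group): an alternative decomposition, not faster.


-- shared translation of `command_description["group"]` (Pre_ guarantees the key is present;
-- the "" default is never reached inside Pre_)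
def pvGroupOf (p : String × List (String × String)) : String :=
  ((PySem.Dict.mk p.2).get? "group").getD ""

-- ===== PORT A =====
-- one loop step of A's `for` body
def pvStepA (groups : PySem.Dict String (List String))
    (p : String × List (String × String)) : PySem.Dict String (List String) :=
  (if groups.contains (pvGroupOf p) then groups
   else groups.insert (pvGroupOf p) []).modify (pvGroupOf p) [] (fun l => l ++ [p.1])

def generate_command_groups (commands_json : List (String × List (String × String))) : List (String × List String) :=
  (commands_json.foldl pvStepA PySem.Dict.empty).items

-- ===== PORT B =====
def generate_command_groups_alt (commands_json : List (String × List (String × String))) : List (String × List String) :=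
  let order := PySem.List.dedup (commands_json.map pvGroupOf)
  order.map (fun g => (g, (commands_json.filter (fun p => pvGroupOf p == g)).map Prod.fst))

-- ===== PRECONDITION & SPEC =====
-- Pre_ excludes exactly the inputs where some description lacks the "group" key, on which Python A raises KeyError.
def Pre_generate_command_groups (commands_json : List (String × List (String × String))) : Prop :=
  (commands_json.all (fun p => (PySem.Dict.mk p.2).contains "group")) = true
instance (commands_json : List (String × List (String × String))) : Decidable (Pre_generate_command_groups commands_json) := by unfold Pre_generate_command_groups; infer_instance

def pvWitness_generate_command_groups : (List (String × List (String × String))) :=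
  [("get", [("group", "generic")]), ("set", [("group", "generic")]), ("lpush", [("group", "list")])]

def Spec_generate_command_groups (commands_json : List (String × List (String × String))) (out : List (String × List String)) : Prop := out = generate_command_groups_alt commands_json
instance (commands_json : List (String × List (String × String))) (out : List (String × List String)) : Decidable (Spec_generate_command_groups commands_json out) := by unfold Spec_generate_command_groups; infer_instance

-- ===== CLAIM (what is proved, stated in full; the proofs are below) =====
def Claim_equal_generate_command_groups : Prop := ∀ (commands_json : List (String × List (String × String))), Dom_generate_command_groups commands_json → Pre_generate_command_groups commands_json → Spec_generate_command_groups commands_json (generate_command_groups commands_json)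

-- ===== LEMMAS AND PROOFS =====

-- one loop step of A, described through keys / getD
lemma pvStepA_keys (d : PySem.Dict String (List String)) (p : String × List (String × String)) :
    (pvStepA d p).keys = PySem.Set.add d.keys (pvGroupOf p) := by
  unfold pvStepA PySem.Set.add
  by_cases h : d.contains (pvGroupOf p)
  · rw [if_pos h, PySem.Dict.keys_modify, PySem.Dict.keys_insert_of_contains _ _ h,
      if_pos ((PySem.Set.contains_iff _ _).mpr ((PySem.Dict.contains_iff_mem_keys d (pvGroupOf p)).mp h))]
  · rw [if_neg h, PySem.Dict.keys_modify, PySem.Dict.keys_insert_of_contains _ _ (PySem.Dict.contains_insert_self ..),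
      PySem.Dict.keys_insert_of_not_contains d ([] : List String) (by simpa using h),
      if_neg (by
        intro hc
        exact h ((PySem.Dict.contains_iff_mem_keys d (pvGroupOf p)).mpr ((PySem.Set.contains_iff _ _).mp hc)))]

lemma pvStepA_getD (d : PySem.Dict String (List String)) (p : String × List (String × String)) (g : String) :
    (pvStepA d p).getD g [] = if g = pvGroupOf p then d.getD (pvGroupOf p) [] ++ [p.1] else d.getD g [] := by
  unfold pvStepA
  by_cases h : d.contains (pvGroupOf p)
  · rw [if_pos h, PySem.Dict.getD_modify]
  · rw [if_neg h, PySem.Dict.getD_modify]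
    split_ifs with hg
    · rw [PySem.Dict.getD_insert, if_pos rfl, PySem.Dict.getD_of_not_contains d ([] : List String) (by simpa using h)]
    · rw [PySem.Dict.getD_insert, if_neg hg]

-- the invariant of A's loop: keys, their uniqueness, and each group's list
lemma pvFold_inv (l : List (String × List (String × String))) :
    (l.foldl pvStepA PySem.Dict.empty).keys = PySem.Set.ofList (l.map pvGroupOf) ∧
    (l.foldl pvStepA PySem.Dict.empty).keys.Nodup ∧
    ∀ g, (l.foldl pvStepA PySem.Dict.empty).getD g [] =
      (l.filter (fun p => pvGroupOf p == g)).map Prod.fst := by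
  induction l using List.reverseRecOn with
  | nil => refine ⟨rfl, by simp [PySem.Dict.keys_empty], fun g => by simp [PySem.Dict.getD_empty]⟩
  | append_singleton l p ih =>
    obtain ⟨hk, hnd, hg⟩ := ih
    rw [List.foldl_append]
    simp only [List.foldl_cons, List.foldl_nil]
    refine ⟨?_, ?_, ?_⟩
    · rw [pvStepA_keys, hk, List.map_append, List.map_cons, List.map_nil]
      simp [PySem.Set.ofList_eq_foldl, List.foldl_append]
    · rw [pvStepA_keys, hk, PySem.Set.add]
      split_ifs with h
      · exact hk ▸ hnd
      · refine List.Nodup.append (hk ▸ hnd) (List.nodup_singleton _) ?_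
        intro a ha hb
        simp only [List.mem_singleton] at hb
        subst hb
        exact h ((PySem.Set.contains_iff _ _).mpr ha)
    · intro g
      rw [pvStepA_getD]
      by_cases hgp : g = pvGroupOf p
      · subst hgp
        rw [if_pos rfl, hg]
        simp [List.filter_append]
      · rw [if_neg hgp, hg]
        have hp : (pvGroupOf p == g) = false := beq_eq_false_iff_ne.mpr (fun h => hgp h.symm)
        simp [List.filter_append, hp]

-- ===== VERDICT (by name: the statement is the Claim_ definition above) =====
theorem generate_command_groups_spec : Claim_equal_generate_command_groups := by
  intro cj _ _
  unfold Spec_generate_command_groups generate_command_groups generate_command_groups_alt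
  obtain ⟨hk, hnd, hg⟩ := pvFold_inv cj
  rw [PySem.Dict.items_eq_map_keys _ hnd [], hk, PySem.List.dedup_eq_ofList]
  exact List.map_congr_left (fun g _ => by rw [hg g])
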